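-- pv_equiv track=rewrite | github.com/sshh12/reality-index | market_analyzer/data_processor.py | categorize_markets
-- ===== SOURCE A (Python) =====
-- from typing import List, Dict
--
-- def categorize_markets(markets: List[Dict]) -> Dict[str, List[Dict]]:
--     """Categorize markets by type/category"""
--     categories = {}
--
--     for market in markets:
--         category = market.get("category", "Other").title()
--         if category not in categories:
--             categories[category] = []
--         categories[category].append(market)
--
--     return categories
-- ===== SOURCE B (Python) =====
-- from typing import List, Dict
--
-- def categorize_markets(markets: List[Dict]) -> Dict[str, List[Dict]]:
--     """Categorize markets by type/category (tag once, dedup keys, filter per key)."""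
--     tagged = [(m.get("category", "Other").title(), m) for m in markets]
--     keys = list(dict.fromkeys(k for k, _ in tagged))
--     return {k: [m for kk, m in tagged if kk == k] for k in keys}
-- ===== Notes on version B (the rewrite author's own statement) =====
-- stated objective: alternative
-- what changed: Replaces the single-pass dict-accumulation with a two-phase plan: first collect the distinct title-cased category keys in first-occurrence order via dict.fromkeys, then build each category's list with one filter pass per key.
import Mathlib
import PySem

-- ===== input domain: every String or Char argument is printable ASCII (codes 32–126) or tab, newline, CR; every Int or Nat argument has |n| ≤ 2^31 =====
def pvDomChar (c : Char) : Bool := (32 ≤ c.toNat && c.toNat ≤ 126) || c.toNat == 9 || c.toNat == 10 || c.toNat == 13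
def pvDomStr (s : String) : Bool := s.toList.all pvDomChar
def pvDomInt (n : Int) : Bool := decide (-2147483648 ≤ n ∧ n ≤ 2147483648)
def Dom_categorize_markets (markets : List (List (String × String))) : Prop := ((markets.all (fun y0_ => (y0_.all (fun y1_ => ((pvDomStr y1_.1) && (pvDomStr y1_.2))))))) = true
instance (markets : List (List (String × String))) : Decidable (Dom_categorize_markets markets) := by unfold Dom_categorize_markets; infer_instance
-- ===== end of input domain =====

-- B groups by first collecting the distinct title-cased category keys (ordered dedup)
-- and then filtering the market list once per key, instead of A's single-pass dict accumulation;
-- objective: alternative decomposition, same results.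

-- ===== PORT A =====
-- str.title(), hand-ported: exact on the ASCII domain, where Python's "cased" = isalpha.
def pvTitleGo : List Char → Bool → List Char
  | [], _ => []
  | c :: rest, prevCased =>
    (if PySem.Chars.isalpha c then
        (if prevCased then PySem.Chars.lowerChar c else PySem.Chars.upperChar c)
      else c) :: pvTitleGo rest (PySem.Chars.isalpha c)

def pvTitle (s : String) : String := String.ofList (pvTitleGo s.toList false)

-- market.get("category", "Other").title()
def pvKey (m : List (String × String)) : String :=
  pvTitle (PySem.Dict.getD (PySem.Dict.mk m) "category" "Other")

def categorize_markets (markets : List (List (String × String))) : List (String × List (List (String × String))) :=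
  (markets.foldl
    (fun categories market =>
      let category := pvKey market
      let categories :=
        if categories.contains category then categories else categories.insert category []
      categories.modify category [] (fun v => v ++ [market]))
    PySem.Dict.empty).items

-- ===== PORT B =====
def categorize_markets_alt (markets : List (List (String × String))) : List (String × List (List (String × String))) :=
  let tagged := markets.map (fun m => (pvKey m, m))
  let keys := PySem.List.dedup (tagged.map (fun p => p.1))
  keys.map (fun k => (k, (tagged.filter (fun p => p.1 == k)).map (fun p => p.2)))

-- ===== PRECONDITION & SPEC =====
def Spec_categorize_markets (markets : List (List (String × String))) (out : List (String × List (List (String × String)))) : Prop := out = categorize_markets_alt markets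
instance (markets : List (List (String × String))) (out : List (String × List (List (String × String)))) : Decidable (Spec_categorize_markets markets out) := by unfold Spec_categorize_markets; infer_instance

-- ===== CLAIM (what is proved, stated in full; the proofs are below) =====
def Claim_equal_categorize_markets : Prop := ∀ (markets : List (List (String × String))), Dom_categorize_markets markets → Spec_categorize_markets markets (categorize_markets markets)

-- ===== LEMMAS AND PROOFS =====

-- A's "setdefault-then-append" step is exactly one Dict.modify.
theorem pv_step_eq {ν : Type} (d : PySem.Dict String (List ν)) (c : String) (m : ν) :
    (if d.contains c then d else d.insert c []).modify c [] (fun v => v ++ [m])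
      = d.modify c [] (fun v => v ++ [m]) := by
  by_cases h : d.contains c = true
  · simp [h]
  · have h' : d.contains c = false := by simpa using h
    have hnone : ∀ p ∈ d.items, (p.1 == c) = false := by
      intro p hp
      by_contra hc
      have hcc : d.contains c = true := by
        simp only [PySem.Dict.contains, List.any_eq_true]
        exact ⟨p, hp, by simpa using hc⟩
      rw [h'] at hcc
      exact Bool.false_ne_true hcc
    rw [if_neg h]
    simp only [PySem.Dict.modify]
    rw [PySem.Dict.getD_insert, if_pos rfl, PySem.Dict.getD_of_not_contains d [] h']
    have hins : (d.insert c ([] : List ν)).items = d.items ++ [(c, [])] := by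
      simp [PySem.Dict.insert, h']
    have hcon : (d.insert c ([] : List ν)).contains c = true := by
      simp [PySem.Dict.contains, hins]
    set e := d.insert c ([] : List ν) with he
    have hL : (e.insert c ([] ++ [m])).items
        = e.items.map (fun p => if (p.1 == c) = true then (c, [] ++ [m]) else p) := by
      simp [PySem.Dict.insert, hcon]
    have hR : (d.insert c ([] ++ [m])).items = d.items ++ [(c, [] ++ [m])] := by
      simp [PySem.Dict.insert, h']
    apply PySem.Dict.ext
    rw [hL, hR, hins, List.map_append]
    congr 1
    · calc d.items.map (fun p => if (p.1 == c) = true then (c, [] ++ [m]) else p)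
          = d.items.map id := List.map_congr_left (fun p hp => by simp [hnone p hp])
        _ = d.items := List.map_id _
    · simp

theorem pv_main (markets : List (List (String × String))) :
    categorize_markets markets = categorize_markets_alt markets := by
  have halt : categorize_markets_alt markets
      = (PySem.List.dedup ((markets.map (fun m => (pvKey m, m))).map (fun p => p.1))).map
          (fun k => (k, ((markets.map (fun m => (pvKey m, m))).filter (fun p => p.1 == k)).map
            (fun p => p.2))) := rfl
  rw [halt]
  unfold categorize_markets
  have hfold : (markets.foldl
      (fun categories market =>
        let category := pvKey market
        let categories :=
          if categories.contains category then categories else categories.insert category []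
        categories.modify category [] (fun v => v ++ [market]))
      PySem.Dict.empty)
    = markets.foldl (fun d m => d.modify (pvKey m) [] (fun v => v ++ [m])) PySem.Dict.empty := by
    congr 1
    funext d m
    exact pv_step_eq d (pvKey m) m
  rw [hfold]
  set F := markets.foldl (fun d m => d.modify (pvKey m) [] (fun v => v ++ [m])) PySem.Dict.empty
    with hF
  have hkeys : F.keys = PySem.Set.ofList (markets.map pvKey) := by
    rw [hF]
    have := PySem.Dict.keys_foldl_modify_key markets pvKey ([] : List (List (String × String)))
      (fun _ m => (fun v => v ++ [m])) PySem.Dict.empty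
    simpa [PySem.Dict.empty, PySem.Dict.keys, PySem.Set.update, PySem.Set.ofList] using this
  have hgetD : ∀ c, F.getD c []
      = ((markets.map (fun m => (pvKey m, m))).filter (fun p => p.1 == c)).map (fun p => p.2) := by
    intro c
    have h1 : F = (markets.map (fun m => (pvKey m, m))).foldl
        (fun d p => d.modify p.1 [] (fun v => v ++ [p.2])) PySem.Dict.empty := by
      rw [hF, List.foldl_map]
    rw [h1, PySem.Dict.getD_foldl_modify_append]
    simp [PySem.Dict.getD, PySem.Dict.get?, PySem.Dict.empty]
  have hnodup : F.keys.Nodup := by rw [hkeys]; exact PySem.Set.nodup_ofList _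
  have hproj : (markets.map (fun m => (pvKey m, m))).map (fun p => p.1) = markets.map pvKey := by
    rw [List.map_map]; rfl
  rw [PySem.Dict.items_eq_map_keys F hnodup [], hkeys, hproj, PySem.List.dedup_eq_ofList]
  exact List.map_congr_left (fun k _ => by rw [hgetD])

-- ===== VERDICT (by name: the statement is the Claim_ definition above) =====
theorem categorize_markets_spec : Claim_equal_categorize_markets := by
  intro markets _
  unfold Spec_categorize_markets
  exact pv_main markets
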